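-- pv_equiv track=rewrite | github.com/boopdotpng/wikibench | wikipedia_bench/article_reader.py | _strip_navbox_region
-- ===== SOURCE A (Python) =====
-- _NAVBOX_PREFIXES = (
--     'navbox', 'authority control', 'taxonbar', 'portal bar',
--     'portal', 'commons category', 'wikiquote', 'wikisource',
--     'wiktionary', 'reflist', 'notelist', 'refbegin', 'refend',
--     'defaultsort', 'short description', 'use dmy', 'use mdy',
-- )
--
-- def _strip_navbox_region(wikitext: str) -> str:
--     """Remove navbox/footer template regions from the end of wikitext."""
--     lines = wikitext.split('\n')
--     cutoff = len(lines)
--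
--     i = len(lines) - 1
--     while i >= 0:
--         stripped = lines[i].strip().lower()
--         if stripped.startswith('{{'):
--             template_name = stripped[2:].split('|')[0].split('}')[0].strip()
--             if any(template_name.startswith(p) for p in _NAVBOX_PREFIXES):
--                 cutoff = i
--                 i -= 1
--                 continue
--         if stripped == '' or stripped.startswith('[[category:'):
--             cutoff = i
--             i -= 1
--             continue
--         break
--
--     return '\n'.join(lines[:cutoff])
-- ===== SOURCE B (Python) =====
-- _NAVBOX_PREFIXES = (
--     'navbox', 'authority control', 'taxonbar', 'portal bar',
--     'portal', 'commons category', 'wikiquote', 'wikisource',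
--     'wiktionary', 'reflist', 'notelist', 'refbegin', 'refend',
--     'defaultsort', 'short description', 'use dmy', 'use mdy',
-- )
--
-- def _is_strippable(line: str) -> bool:
--     stripped = line.strip().lower()
--     if stripped == '' or stripped.startswith('[[category:'):
--         return True
--     if stripped.startswith('{{'):
--         name = stripped[2:].split('|')[0].split('}')[0].strip()
--         return any(name.startswith(p) for p in _NAVBOX_PREFIXES)
--     return False
--
-- def _strip_navbox_region(wikitext: str) -> str:
--     lines = wikitext.split('\n')
--     last_kept = -1
--     for i, line in enumerate(lines):
--         if not _is_strippable(line):
--             last_kept = i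
--     return '\n'.join(lines[:last_kept + 1])
-- ===== Notes on version B (the rewrite author's own statement) =====
-- stated objective: alternative
-- what changed: Backward while-loop with break and mutable cutoff replaced by a forward single pass over enumerated lines tracking last_kept (highest non-strippable index), with the strippable test factored into a predicate helper whose cheap blank/category checks come first; returns lines[:last_kept+1].
import Mathlib
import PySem

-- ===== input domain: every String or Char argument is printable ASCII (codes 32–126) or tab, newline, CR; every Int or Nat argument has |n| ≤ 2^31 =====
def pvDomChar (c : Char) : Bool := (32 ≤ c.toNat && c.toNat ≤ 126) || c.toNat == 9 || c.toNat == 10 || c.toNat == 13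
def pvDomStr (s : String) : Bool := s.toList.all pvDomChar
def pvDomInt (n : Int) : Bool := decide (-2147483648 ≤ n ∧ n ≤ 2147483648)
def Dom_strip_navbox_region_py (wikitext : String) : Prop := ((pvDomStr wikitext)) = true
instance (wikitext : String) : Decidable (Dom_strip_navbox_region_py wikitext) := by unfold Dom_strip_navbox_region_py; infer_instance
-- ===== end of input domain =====

-- B replaces A's backward while-loop (break + mutable cutoff) by a forward single pass tracking
-- the last non-strippable line index, with the strippable test factored into a helper (objective: alternative).

-- ===== PORT A =====
def pvNavboxPrefixes : List String :=
  ["navbox", "authority control", "taxonbar", "portal bar",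
   "portal", "commons category", "wikiquote", "wikisource",
   "wiktionary", "reflist", "notelist", "refbegin", "refend",
   "defaultsort", "short description", "use dmy", "use mdy"]

-- A's while loop: fuel = i + 1 (fuel 0 ↔ i = -1); cutoff is the mutable variable.
-- lines[i] is always in range in A (0 ≤ i < len), so getD with "" is exact here.
def pvALoop (lines : List String) : Nat → Nat → Nat
  | cutoff, 0 => cutoff
  | cutoff, k + 1 =>
    let stripped := PySem.Str.lower (PySem.Str.strip (lines.getD k ""))
    if PySem.Str.startswith stripped "{{" &&
        (let template_name := PySem.Str.strip
          (((PySem.Str.split? (((PySem.Str.split? (PySem.Str.slice stripped (some 2) none) "|").getD []).headD "") "}").getD []).headD "")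
         pvNavboxPrefixes.any (fun p => PySem.Str.startswith template_name p)) then
      pvALoop lines k k
    else if stripped == "" || PySem.Str.startswith stripped "[[category:" then
      pvALoop lines k k
    else cutoff

def strip_navbox_region_py (wikitext : String) : String :=
  -- split('\n') with a nonempty literal separator: split? is some; getD [] is exact
  let lines := (PySem.Str.split? wikitext "\n").getD []
  let cutoff := lines.length
  PySem.Str.join "\n" (lines.take (pvALoop lines cutoff lines.length))

-- ===== PORT B =====
def pvIsStrippable (line : String) : Bool :=
  let stripped := PySem.Str.lower (PySem.Str.strip line)
  if stripped == "" || PySem.Str.startswith stripped "[[category:" then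
    true
  else if PySem.Str.startswith stripped "{{" then
    let name := PySem.Str.strip
      (((PySem.Str.split? (((PySem.Str.split? (PySem.Str.slice stripped (some 2) none) "|").getD []).headD "") "}").getD []).headD "")
    pvNavboxPrefixes.any (fun p => PySem.Str.startswith name p)
  else false

def strip_navbox_region_py_alt (wikitext : String) : String :=
  let lines := (PySem.Str.split? wikitext "\n").getD []
  let last_kept : Int := (PySem.List.enumerate lines).foldl
    (fun acc p => if !pvIsStrippable p.2 then p.1 else acc) (-1)
  PySem.Str.join "\n" (PySem.List.slice lines none (some (last_kept + 1)))

-- ===== PRECONDITION & SPEC =====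
def Spec_strip_navbox_region_py (wikitext : String) (out : String) : Prop := out = strip_navbox_region_py_alt wikitext
instance (wikitext : String) (out : String) : Decidable (Spec_strip_navbox_region_py wikitext out) := by unfold Spec_strip_navbox_region_py; infer_instance

-- ===== CLAIM (what is proved, stated in full; the proofs are below) =====
def Claim_equal_strip_navbox_region_py : Prop := ∀ (wikitext : String), Dom_strip_navbox_region_py wikitext → Spec_strip_navbox_region_py wikitext (strip_navbox_region_py wikitext)

-- ===== LEMMAS AND PROOFS =====

-- the common resulting-length of the kept prefix: drop the trailing strippable run
def pvKeep (xs : List String) : Nat := (xs.reverse.dropWhile pvIsStrippable).length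

lemma pvKeep_nil : pvKeep [] = 0 := rfl

lemma pvKeep_concat (xs : List String) (x : String) :
    pvKeep (xs ++ [x]) = if pvIsStrippable x then pvKeep xs else xs.length + 1 := by
  unfold pvKeep
  simp only [List.reverse_append, List.reverse_singleton, List.singleton_append,
    List.dropWhile_cons]
  split_ifs with h <;> simp

-- A's loop step is decided exactly by pvIsStrippable (Boolean reassociation of the two branches)
lemma pvALoop_succ (lines : List String) (c k : Nat) :
    pvALoop lines c (k + 1) =
      if pvIsStrippable (lines.getD k "") then pvALoop lines k k else c := by
  rw [pvALoop, pvIsStrippable]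
  set stripped := PySem.Str.lower (PySem.Str.strip (lines.getD k "")) with hs
  by_cases h1 : (stripped == "" || PySem.Str.startswith stripped "[[category:") = true <;>
    by_cases h2 : PySem.Str.startswith stripped "{{" = true <;>
      simp only [h1, h2, Bool.true_and, Bool.false_and, if_true] <;>
    split <;> simp_all

-- A's loop from i = k-1 computes pvKeep of the first k lines
lemma pvALoop_keep (lines : List String) : ∀ k, k ≤ lines.length →
    pvALoop lines k k = pvKeep (lines.take k) := by
  intro k
  induction k with
  | zero => intro _; simp [pvALoop, pvKeep]
  | succ k ih =>
    intro hk
    have hk' : k < lines.length := by omega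
    have htake : lines.take (k + 1) = lines.take k ++ [lines.getD k ""] := by
      rw [List.take_add_one]
      simp [List.getD_eq_getElem?_getD, List.getElem?_eq_getElem hk']
    rw [pvALoop_succ, htake, pvKeep_concat]
    by_cases h : pvIsStrippable (lines.getD k "")
    · simp only [List.getD_eq_getElem?_getD] at h
      simp [h, ih (by omega)]
    · simp only [List.getD_eq_getElem?_getD] at h
      simp [h, List.length_take, Nat.min_eq_left (le_of_lt hk')]

-- enumerate of a snoc appends one indexed pair
lemma pvEnumerate_concat {α : Type} (xs : List α) (x : α) : ∀ (s : Int),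
    PySem.List.enumerate (xs ++ [x]) s = PySem.List.enumerate xs s ++ [(s + xs.length, x)] := by
  induction xs with
  | nil => intro s; simp [PySem.List.enumerate]
  | cons y ys ih =>
    intro s
    simp only [List.cons_append, PySem.List.enumerate, ih (s + 1), List.length_cons]
    have : s + 1 + (ys.length : Int) = s + ((ys.length : Int) + 1) := by ring
    simp [this]

-- B's fold computes pvKeep - 1 (as the last kept index)
lemma pvFold_keep (xs : List String) :
    (PySem.List.enumerate xs).foldl
        (fun acc p => if !pvIsStrippable p.2 then p.1 else acc) (-1) + 1 = (pvKeep xs : Int) := by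
  induction xs using List.reverseRecOn with
  | nil => simp [PySem.List.enumerate, pvKeep_nil]
  | append_singleton ys x ih =>
    rw [pvEnumerate_concat, List.foldl_append, pvKeep_concat]
    by_cases h : pvIsStrippable x
    · simpa [h] using ih
    · simp [h]

-- ===== VERDICT (by name: the statement is the Claim_ definition above) =====
-- both ports produce the join of the same kept prefix
lemma pvMain (L : List String) :
    PySem.Str.join "\n" (L.take (pvALoop L L.length L.length)) =
      PySem.Str.join "\n" (PySem.List.slice L none
        (some ((PySem.List.enumerate L).foldl
          (fun acc p => if !pvIsStrippable p.2 then p.1 else acc) (-1) + 1))) := by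
  have hA : pvALoop L L.length L.length = pvKeep L := by
    rw [pvALoop_keep L L.length le_rfl, List.take_length]
  have hB := pvFold_keep L
  set lk : Int := (PySem.List.enumerate L).foldl
    (fun acc p => if !pvIsStrippable p.2 then p.1 else acc) (-1) with hlk
  have h0 : 0 ≤ lk + 1 := by rw [hB]; exact Int.natCast_nonneg _
  rw [hA, PySem.List.slice_to L h0]
  congr 2
  omega

theorem strip_navbox_region_py_spec : Claim_equal_strip_navbox_region_py := by
  intro wikitext _
  exact pvMain ((PySem.Str.split? wikitext "\n").getD [])
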